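-- pv_equiv track=rewrite | github.com/lordjuacs/compe | final/pE.py | punct
-- ===== SOURCE A (Python) =====
-- from math import gcd
--
-- def find(h, start, end):
--     num = h[end] - h[start + 1]
--     den = h[start] - h[start + 1]
--     maximo = gcd(num, den)
--     return end - start - 1, num // maximo, den // maximo
--
-- def punct(h):
--     i = [-1] * len(h)
--     t = -1
--     maxtam = 0
--     maxnum = 0
--     maxden = 1
--     for curr in range(len(h)):
--         while t >= 0 and h[i[t]] < h[curr]:
--             t -= 1
--         if t >= 0:
--             tam, tamnum, tamden = find(h, i[t], curr)
--             if tam > maxtam or (tam == maxtam and tamnum * maxden < tamden * maxnum):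
--                 maxtam = tam
--                 maxnum = tamnum
--                 maxden = tamden
--         t += 1
--         i[t] = curr
--     return maxtam, maxnum, maxden
-- ===== SOURCE B (Python) =====
-- from math import gcd
--
-- def _best_pair(h, j, curr):
--     num = h[curr] - h[j + 1]
--     den = h[j] - h[j + 1]
--     g = gcd(num, den)
--     return curr - j - 1, num // g, den // g
--
-- def punct(h):
--     maxtam, maxnum, maxden = 0, 0, 1
--     for curr in range(len(h)):
--         j = curr - 1
--         while j >= 0 and h[j] < h[curr]:
--             j -= 1
--         if j >= 0:
--             tam, num, den = _best_pair(h, j, curr)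
--             if tam > maxtam or (tam == maxtam and num * maxden < den * maxnum):
--                 maxtam, maxnum, maxden = tam, num, den
--     return maxtam, maxnum, maxden
-- ===== Notes on version B (the rewrite author's own statement) =====
-- stated objective: simpler
-- what changed: Replaced the explicit monotonic stack (array i with top pointer t) by a direct backward scan from curr-1 for the nearest previous index with h[j] >= h[curr], keeping the identical fraction computation and comparison.
import Mathlib
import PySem

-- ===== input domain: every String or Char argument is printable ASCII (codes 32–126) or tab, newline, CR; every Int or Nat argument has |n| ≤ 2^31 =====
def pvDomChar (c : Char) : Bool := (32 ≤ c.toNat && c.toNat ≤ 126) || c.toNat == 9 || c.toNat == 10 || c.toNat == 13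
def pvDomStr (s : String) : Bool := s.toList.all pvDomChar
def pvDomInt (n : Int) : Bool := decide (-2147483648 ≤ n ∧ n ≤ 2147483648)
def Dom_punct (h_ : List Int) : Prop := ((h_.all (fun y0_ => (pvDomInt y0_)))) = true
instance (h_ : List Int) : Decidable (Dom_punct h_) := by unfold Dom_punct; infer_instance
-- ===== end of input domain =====

-- B replaces A's explicit monotonic stack by a backward scan for the nearest previous index
-- with h[j] >= h[curr]; objective: simpler. Return values agree on Pre_ (proved below).

-- ===== PORT A =====
-- find(h, start, end) of Source A
def findA (h : List Int) (start fin : Nat) : Int × Int × Int :=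
  let num := h.getD fin 0 - h.getD (start + 1) 0
  let den := h.getD start 0 - h.getD (start + 1) 0
  let maximo : Int := Int.gcd num den
  ((fin : Int) - (start : Int) - 1, PySem.Int.floordiv num maximo, PySem.Int.floordiv den maximo)

-- the inner 'while t >= 0 and h[i[t]] < h[curr]: t -= 1' (stack as list, top first)
def popA (h : List Int) (curr : Nat) (s : List Nat) : List Nat :=
  s.dropWhile (fun j => decide (h.getD j 0 < h.getD curr 0))

-- one iteration of A's for-loop: state = (stack i[0..t] top-first, (maxtam, maxnum, maxden))
def stepA (h : List Int) (st : List Nat × (Int × Int × Int)) (curr : Nat) :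
    List Nat × (Int × Int × Int) :=
  let s := popA h curr st.1
  let acc :=
    match s with
    | [] => st.2
    | j :: _ =>
        let t := findA h j curr
        if t.1 > st.2.1 ∨ (t.1 = st.2.1 ∧ t.2.1 * st.2.2.2 < t.2.2 * st.2.2.1) then t else st.2
  (curr :: s, acc)

def punct (h_ : List Int) : Int × Int × Int :=
  ((List.range h_.length).foldl (stepA h_) ([], (0, 0, 1))).2

-- ===== PORT B =====
-- _best_pair(h, j, curr) of Source B
def findB (h : List Int) (j curr : Nat) : Int × Int × Int :=
  let num := h.getD curr 0 - h.getD (j + 1) 0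
  let den := h.getD j 0 - h.getD (j + 1) 0
  let g : Int := Int.gcd num den
  ((curr : Int) - (j : Int) - 1, PySem.Int.floordiv num g, PySem.Int.floordiv den g)

-- 'j = curr-1; while j >= 0 and h[j] < h[curr]: j -= 1' — scan j, j-1, …, 0
def findGE (h : List Int) (hc : Int) : Nat → Option Nat
  | 0 => if h.getD 0 0 < hc then none else some 0
  | j + 1 => if h.getD (j + 1) 0 < hc then findGE h hc j else some (j + 1)

def stepB (h : List Int) (acc : Int × Int × Int) (curr : Nat) : Int × Int × Int :=
  match curr with
  | 0 => acc
  | c + 1 =>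
      match findGE h (h.getD (c + 1) 0) c with
      | none => acc
      | some j =>
          let t := findB h j (c + 1)
          if t.1 > acc.1 ∨ (t.1 = acc.1 ∧ t.2.1 * acc.2.2 < t.2.2 * acc.2.1) then t else acc

def punct_alt (h_ : List Int) : Int × Int × Int :=
  (List.range h_.length).foldl (stepB h_) (0, 0, 1)

-- ===== PRECONDITION & SPEC =====
-- Pre_ excludes lists with two adjacent equal elements: there the Python A (and B) hits
-- gcd(0,0) = 0 and raises ZeroDivisionError.
def Pre_punct (h_ : List Int) : Prop := ∀ p ∈ h_.zip h_.tail, p.1 ≠ p.2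
instance (h_ : List Int) : Decidable (Pre_punct h_) := by unfold Pre_punct; infer_instance
def pvWitness_punct : List Int := [3, 1, 2]

def Spec_punct (h_ : List Int) (out : Int × Int × Int) : Prop := out = punct_alt h_
instance (h_ : List Int) (out : Int × Int × Int) : Decidable (Spec_punct h_ out) := by unfold Spec_punct; infer_instance

-- ===== CLAIM (what is proved, stated in full; the proofs are below) =====
def Claim_equal_punct : Prop := ∀ (h_ : List Int), Dom_punct h_ → Pre_punct h_ → Spec_punct h_ (punct h_)

-- ===== LEMMAS AND PROOFS =====

-- canonical stack contents before iteration c of A's loop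
def canon (h : List Int) : Nat → List Nat
  | 0 => []
  | n + 1 => n :: popA h n (canon h n)

theorem stackA_eq_canon (h : List Int) (a : Int × Int × Int) (n : Nat) :
    ((List.range n).foldl (stepA h) ([], a)).1 = canon h n := by
  induction n generalizing a with
  | zero => rfl
  | succ n ih =>
      rw [List.range_succ, List.foldl_append]
      simp only [List.foldl_cons, List.foldl_nil, stepA, canon]
      rw [ih]

theorem mem_dropWhile_of_not {p : Nat → Bool} {j : Nat} {s : List Nat}
    (hm : j ∈ s) (hp : p j = false) : j ∈ s.dropWhile p := by
  induction s with
  | nil => cases hm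
  | cons a t ih =>
      rw [List.dropWhile_cons]
      rcases List.mem_cons.mp hm with rfl | hm'
      · simp [hp]
      · cases hpa : p a
        · simp [List.mem_cons_of_mem _ hm']
        · simp only [if_pos rfl]; exact ih hm'

theorem dropWhile_cons_head {p : Nat → Bool} {s : List Nat} {a : Nat} {t : List Nat}
    (hd : s.dropWhile p = a :: t) : p a = false := by
  induction s with
  | nil => cases hd
  | cons b u ih =>
      rw [List.dropWhile_cons] at hd
      cases hb : p b
      · rw [hb, if_neg (by simp)] at hd; cases hd; exact hb
      · rw [hb, if_pos rfl] at hd; exact ih hd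

theorem canon_props (h : List Int) (c : Nat) :
    (canon h c).Pairwise (fun a b => b < a) ∧
    (∀ j, j ∈ canon h c ↔ (j < c ∧ ∀ k, j < k → k < c → h.getD k 0 ≤ h.getD j 0)) := by
  induction c with
  | zero =>
      refine ⟨List.Pairwise.nil, ?_⟩
      intro j; simp [canon]
  | succ n ih =>
      obtain ⟨hpw, hmem⟩ := ih
      have hsub : List.Sublist (popA h n (canon h n)) (canon h n) := List.dropWhile_sublist _
      have hpw' : (popA h n (canon h n)).Pairwise (fun a b => b < a) := hpw.sublist hsub
      have hmem_pop : ∀ j, j ∈ popA h n (canon h n) →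
          (j < n ∧ (∀ k, j < k → k < n → h.getD k 0 ≤ h.getD j 0) ∧
            h.getD n 0 ≤ h.getD j 0) := by
        intro j hj
        have hjc : j ∈ canon h n := hsub.mem hj
        obtain ⟨hjn, hjp⟩ := (hmem j).mp hjc
        refine ⟨hjn, hjp, ?_⟩
        cases hdp : popA h n (canon h n) with
        | nil => rw [hdp] at hj; cases hj
        | cons a t =>
            have ha : (decide (h.getD a 0 < h.getD n 0)) = false := dropWhile_cons_head hdp
            have haN : ¬ h.getD a 0 < h.getD n 0 := by simpa using ha
            have haC : a ∈ canon h n := hsub.mem (by rw [hdp]; exact List.mem_cons_self ..)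
            obtain ⟨han, hap⟩ := (hmem a).mp haC
            rw [hdp] at hj
            rcases List.mem_cons.mp hj with rfl | hjt
            · omega
            · have hlt : j < a := by
                have hpc := hpw'
                rw [hdp] at hpc
                exact (List.pairwise_cons.mp hpc).1 j hjt
              have h1 : h.getD a 0 ≤ h.getD j 0 := hjp a hlt han
              omega
      constructor
      · rw [canon]
        refine List.pairwise_cons.mpr ⟨?_, hpw'⟩
        intro b hb; exact (hmem_pop b hb).1
      · intro j
        rw [canon, List.mem_cons]
        constructor
        · rintro (rfl | hj)
          · exact ⟨Nat.lt_succ_self _, by intro k hk1 hk2; omega⟩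
          · obtain ⟨h1, h2, h3⟩ := hmem_pop j hj
            refine ⟨by omega, ?_⟩
            intro k hk1 hk2
            rcases Nat.lt_succ_iff_lt_or_eq.mp hk2 with hk | rfl
            · exact h2 k hk1 hk
            · exact h3
        · rintro ⟨hjn, hjp⟩
          rcases Nat.lt_succ_iff_lt_or_eq.mp hjn with hj | rfl
          · right
            have hjc : j ∈ canon h n := (hmem j).mpr ⟨hj, fun k hk1 hk2 => hjp k hk1 (by omega)⟩
            refine mem_dropWhile_of_not hjc ?_
            have hle := hjp n hj (Nat.lt_succ_self _)
            simp only [decide_eq_false_iff_not]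
            omega
          · left; rfl

theorem head?_dropWhile {p : Nat → Bool} (s : List Nat) :
    (s.dropWhile p).head? = s.find? (fun j => !p j) := by
  induction s with
  | nil => rfl
  | cons a t ih =>
      rw [List.dropWhile_cons, List.find?_cons]
      cases ha : p a
      · simp [ha]
      · simp [ha, ih]

theorem findGE_none (h : List Int) (hc : Int) (j : Nat) :
    findGE h hc j = none ↔ ∀ k, k ≤ j → h.getD k 0 < hc := by
  induction j with
  | zero =>
      simp only [findGE]; split_ifs with hh
      · simp only [true_iff]; intro k hk; interval_cases k; exact hh
      · simp only [false_iff, not_forall]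
        exact ⟨0, by simpa using le_of_not_gt hh⟩
  | succ n ih =>
      simp only [findGE]; split_ifs with hh
      · rw [ih]
        constructor
        · intro H k hk
          rcases Nat.lt_succ_iff_lt_or_eq.mp (Nat.lt_succ_of_le hk) with h1 | rfl
          · exact H k (by omega)
          · exact hh
        · intro H k hk; exact H k (by omega)
      · simp only [false_iff, not_forall]
        exact ⟨n + 1, by simpa using le_of_not_gt hh⟩

theorem findGE_some (h : List Int) (hc : Int) (j m : Nat) (hs : findGE h hc j = some m) :
    m ≤ j ∧ hc ≤ h.getD m 0 ∧ ∀ k, m < k → k ≤ j → h.getD k 0 < hc := by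
  induction j with
  | zero =>
      simp only [findGE] at hs
      split_ifs at hs with hh
      all_goals cases hs
      refine ⟨le_refl _, le_of_not_gt hh, ?_⟩
      intro k hk1 hk2; omega
  | succ n ih =>
      simp only [findGE] at hs; split_ifs at hs with hh
      · obtain ⟨h1, h2, h3⟩ := ih hs
        refine ⟨by omega, h2, ?_⟩
        intro k hk1 hk2
        rcases Nat.lt_succ_iff_lt_or_eq.mp (Nat.lt_succ_of_le hk2) with hk | rfl
        · exact h3 k hk1 (by omega)
        · exact hh
      · cases hs
        refine ⟨le_refl _, le_of_not_gt hh, ?_⟩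
        intro k hk1 hk2; omega

theorem find?_sorted {q : Nat → Bool} {s : List Nat} {m : Nat}
    (hpw : s.Pairwise (fun a b => b < a)) (hm : m ∈ s) (hq : q m = true)
    (hup : ∀ j, j ∈ s → m < j → q j = false) : s.find? q = some m := by
  induction s with
  | nil => cases hm
  | cons a t ih =>
      obtain ⟨ha, hpw'⟩ := List.pairwise_cons.mp hpw
      rw [List.find?_cons]
      rcases List.mem_cons.mp hm with rfl | hm'
      · simp [hq]
      · have hma : m < a := ha m hm'
        have hqa : q a = false := hup a (List.mem_cons_self ..) hma
        rw [hqa]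
        simp only [Bool.false_eq_true, if_false]
        exact ih hpw' hm' (fun j hj => hup j (List.mem_cons_of_mem _ hj))

theorem key_head (h : List Int) (c : Nat) :
    (popA h (c + 1) (canon h (c + 1))).head? = findGE h (h.getD (c + 1) 0) c := by
  obtain ⟨hpw, hmem⟩ := canon_props h (c + 1)
  unfold popA
  rw [head?_dropWhile]
  cases hf : findGE h (h.getD (c + 1) 0) c with
  | none =>
      rw [List.find?_eq_none]
      intro j hj
      obtain ⟨hjc, _⟩ := (hmem j).mp hj
      have hlt := (findGE_none h (h.getD (c + 1) 0) c).mp hf j (by omega)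
      show ¬ (!decide (h.getD j 0 < h.getD (c + 1) 0)) = true
      simpa using hlt
  | some m =>
      obtain ⟨h1, h2, h3⟩ := findGE_some h (h.getD (c + 1) 0) c m hf
      refine find?_sorted hpw ?_ ?_ ?_
      · refine (hmem m).mpr ⟨by omega, ?_⟩
        intro k hk1 hk2
        have hlt : h.getD k 0 < h.getD (c + 1) 0 := by
          rcases Nat.lt_succ_iff_lt_or_eq.mp hk2 with hk | rfl
          · exact h3 k hk1 (by omega)
          · exact h3 _ hk1 (le_refl _)
        omega
      · show (!decide (h.getD m 0 < h.getD (c + 1) 0)) = true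
        simp only [Bool.not_eq_true', decide_eq_false_iff_not]
        omega
      · intro j hj hmj
        obtain ⟨hjc, _⟩ := (hmem j).mp hj
        have hlt := h3 j hmj (by omega)
        show (!decide (h.getD j 0 < h.getD (c + 1) 0)) = false
        simp only [Bool.not_eq_false', decide_eq_true_eq]
        omega

theorem foldl_agree (h : List Int) (n : Nat) :
    ((List.range n).foldl (stepA h) ([], (0, 0, 1))).2 =
      (List.range n).foldl (stepB h) (0, 0, 1) := by
  induction n with
  | zero => rfl
  | succ n ih =>
      rw [List.range_succ, List.foldl_append, List.foldl_append]
      simp only [List.foldl_cons, List.foldl_nil]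
      have hs := stackA_eq_canon h (0, 0, 1) n
      cases n with
      | zero =>
          simp only [stepA, stepB]
          rw [hs]
          simpa [canon, popA] using ih
      | succ c =>
          simp only [stepA, stepB]
          rw [hs]
          have hk := key_head h c
          cases hf : findGE h (h.getD (c + 1) 0) c with
          | none =>
              rw [hf] at hk
              cases hdp : popA h (c + 1) (canon h (c + 1)) with
              | nil => simp [ih]
              | cons a t => rw [hdp] at hk; cases hk
          | some m =>
              rw [hf] at hk
              cases hdp : popA h (c + 1) (canon h (c + 1)) with
              | nil => rw [hdp] at hk; cases hk
              | cons a t =>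
                  rw [hdp] at hk
                  simp only [List.head?_cons, Option.some.injEq] at hk
                  subst hk
                  have hfind : findA h a (c + 1) = findB h a (c + 1) := rfl
                  simp [hfind, ih]

-- ===== VERDICT (by name: the statement is the Claim_ definition above) =====
theorem punct_spec : Claim_equal_punct := by
  intro h_ _ _
  unfold Spec_punct punct punct_alt
  exact foldl_agree h_ h_.length
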